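-- pv_equiv track=rewrite | github.com/Shouryadhatrika/Smart_interview_primary | Solutions/Information Passed In N-ary Tree.py | solve
-- ===== SOURCE A (Python) =====
-- def solve(arr,index):
--     if len(arr[index])==0:
--         return 0
--     list=[]
--     for i in arr[index]:
--         list.append(solve(arr,i))
--     list.sort(reverse=True)
--     mx=float("-inf")
--     for i in range(len(list)):
--         mx=max(mx,list[i]+(i+1))
--     return mx
-- ===== SOURCE B (Python) =====
-- def solve(arr, index):
--     # Iterative bottom-up DP over the nodes reachable from index: first take the
--     # transitive closure of the child relation, then repeatedly sweep it, filling
--     # a node's value (sorted child values, max of value + rank) once all of its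
--     # children are filled.  Each node is evaluated once, unlike the recursion.
--     reach = {index}
--     while True:
--         bigger = reach | {c for j in reach for c in arr[j]}
--         if bigger == reach:
--             break
--         reach = bigger
--     value = {}
--     for _ in range(len(arr)):
--         for j in reach:
--             if j not in value and all(c in value for c in arr[j]):
--                 ranked = sorted((value[c] for c in arr[j]), reverse=True)
--                 value[j] = max((v + i + 1 for i, v in enumerate(ranked)), default=0)
--     return value[index]
-- ===== Notes on version B (the rewrite author's own statement) =====
-- stated objective: alternative
-- what changed: Replaces the top-down recursion with an iterative bottom-up DP: first the set of nodes reachable from index is computed as a fixpoint of the child relation, then repeated sweeps over that set fill a value table (sorted child values, max of value+rank) once a node's children are all filled, evaluating each node once instead of once per reference.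
import Mathlib
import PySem

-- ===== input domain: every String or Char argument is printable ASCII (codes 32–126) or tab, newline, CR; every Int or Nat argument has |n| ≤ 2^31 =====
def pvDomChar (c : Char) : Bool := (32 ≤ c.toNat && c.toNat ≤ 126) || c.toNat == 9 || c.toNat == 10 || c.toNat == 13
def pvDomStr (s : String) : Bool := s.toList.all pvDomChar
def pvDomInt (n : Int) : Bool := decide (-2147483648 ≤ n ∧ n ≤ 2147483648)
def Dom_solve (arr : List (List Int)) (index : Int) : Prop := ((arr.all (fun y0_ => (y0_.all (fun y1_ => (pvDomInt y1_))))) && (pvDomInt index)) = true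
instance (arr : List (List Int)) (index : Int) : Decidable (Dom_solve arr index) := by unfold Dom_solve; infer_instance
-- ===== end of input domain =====

-- B replaces A's top-down recursion by an iterative bottom-up DP (reachable-set closure, then sweeps filling a value table); equal on Pre_, A's termination region.


-- ===== PORT A =====
-- fuel-indexed transliteration of A's recursion (fuel only makes it total; on Pre_ inputs
-- the recursion depth is at most arr.length, so the fuel below never runs out)
def solveA (arr : List (List Int)) (fuel : Nat) (index : Int) : Int :=
  match fuel with
  | 0 => 0
  | Nat.succ f =>
    let children := PySem.List.pyGetD arr index []          -- arr[index] (Pre_ excludes IndexError)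
    if children.length = 0 then 0
    else
      -- list = []; for i in arr[index]: list.append(solve(arr, i))
      let vals := children.foldl (fun l i => l ++ [solveA arr f i]) ([] : List Int)
      -- list.sort(reverse=True)
      let sortedVals := PySem.List.sorted vals (fun x => x) true
      -- mx = -inf; for i in range(len(list)): mx = max(mx, list[i] + (i+1))   (none plays -inf)
      let mx := (PySem.List.pyRange 0 (sortedVals.length : Int) 1).foldl
        (fun (mx : Option Int) i =>
          match mx with
          | none => some (PySem.List.pyGetD sortedVals i 0 + (i + 1))
          | some m => some (max m (PySem.List.pyGetD sortedVals i 0 + (i + 1)))) none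
      mx.getD 0                                             -- unreachable default: list is non-empty

def solve (arr : List (List Int)) (index : Int) : Int := solveA arr arr.length index

-- ===== PORT B =====
-- one closure round: reach | {c for j in reach for c in arr[j]}   (arr[j]: Pre_ excludes IndexError)
def reachStep (arr : List (List Int)) (s : PySem.Set Int) : PySem.Set Int :=
  PySem.Set.update s (s.flatMap (fun j => PySem.List.pyGetD arr j []))

-- while True: bigger = …; if bigger == reach: break; reach = bigger
-- (fuel only makes the loop total: inside Pre_ every round before the fixpoint adds a new
-- element of index :: arr.flatten, so the fuel passed below never runs out)
def reachClose (arr : List (List Int)) : Nat → PySem.Set Int → PySem.Set Int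
  | 0, s => s
  | f + 1, s =>
    if PySem.Set.equal (reachStep arr s) s then s
    else reachClose arr f (reachStep arr s)

-- sorted((value[c] for c in arr[j]), reverse=True)   (reads are guarded by bStep's `all`)
def bRanked (arr : List (List Int)) (value : PySem.Dict Int Int) (j : Int) : List Int :=
  PySem.List.sorted ((PySem.List.pyGetD arr j []).map
    (fun c => ((value.get? c).getD 0))) (fun x => x) true

-- max((v + i + 1 for i, v in enumerate(ranked)), default=0)
def bBest (arr : List (List Int)) (value : PySem.Dict Int Int) (j : Int) : Int :=
  match (PySem.List.enumerate (bRanked arr value j)).map (fun p => p.2 + p.1 + 1) with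
  | [] => 0
  | x :: xs => xs.foldl max x

-- the body of B's sweep: `if j not in value and all(c in value for c in arr[j]): value[j] = ...`
def bStep (arr : List (List Int)) (value : PySem.Dict Int Int) (j : Int) : PySem.Dict Int Int :=
  if (value.get? j).isNone
      && (PySem.List.pyGetD arr j []).all (fun c => (value.get? c).isSome)
  then value.insert j (bBest arr value j)
  else value

def solve_alt (arr : List (List Int)) (index : Int) : Int :=
  -- reach = {index}; while True: …  (fuel = 1 + total number of references, see reachClose)
  let reach := reachClose arr (arr.foldl (fun a row => a + row.length) 0 + 1)
    (PySem.Set.ofList [index])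
  -- value = {}; for _ in range(len(arr)): for j in reach: ...
  let value := (List.range arr.length).foldl
    (fun value _ => reach.foldl (bStep arr) value) PySem.Dict.empty
  -- return value[index]   (guarded: inside Pre_ this key is present)
  (value.get? index).getD 0

-- ===== PRECONDITION & SPEC =====
-- Python's wraparound normalisation of an in-range index
def normc (n : Nat) (c : Int) : Nat := (if c < 0 then c + n else c).toNat

-- level sets of the well-founded core of the reference graph: j ∈ gset (k+1) iff every child
-- reference of j is in range and its normalisation lies in gset k (so leaves are in gset 1, …)
def gset (arr : List (List Int)) : Nat → List Nat
  | 0 => []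
  | k + 1 =>
    let prev := gset arr k
    (List.range arr.length).filter (fun j =>
      (arr.getD j []).all (fun c =>
        decide (PySem.Raise.InRange arr.length c)
          && prev.contains (normc arr.length c)))

-- Pre_ is exactly A's termination region: the start index is in range (Python-style, possibly
-- negative) and lies in the well-founded core of the child-reference graph — outside it A
-- raises IndexError on an out-of-range reachable reference or recurses forever on a cycle.
def Pre_solve (arr : List (List Int)) (index : Int) : Prop :=
  PySem.Raise.InRange arr.length index ∧ normc arr.length index ∈ gset arr arr.length
instance (arr : List (List Int)) (index : Int) : Decidable (Pre_solve arr index) := by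
  unfold Pre_solve PySem.Raise.InRange; infer_instance

def pvWitness_solve : List (List Int) × Int := ([[1, 2], [], []], 0)

def Spec_solve (arr : List (List Int)) (index : Int) (out : Int) : Prop := out = solve_alt arr index
instance (arr : List (List Int)) (index : Int) (out : Int) : Decidable (Spec_solve arr index out) := by unfold Spec_solve; infer_instance

-- ===== CLAIM (what is proved, stated in full; the proofs are below) =====
def Claim_equal_solve : Prop := ∀ (arr : List (List Int)) (index : Int), Dom_solve arr index → Pre_solve arr index → Spec_solve arr index (solve arr index)

-- ===== LEMMAS AND PROOFS =====

-- Python negative-index wraparound for in-range negatives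
theorem pyGetD_wrap {α : Type} (xs : List α) (i : Int) (d : α)
    (h1 : -(xs.length : Int) ≤ i) (h2 : i < 0) :
    PySem.List.pyGetD xs i d = PySem.List.pyGetD xs (i + xs.length) d := by
  have hk1 : 0 < (-i).toNat := by omega
  have hk2 : (-i).toNat ≤ xs.length := by omega
  have hi : i = -(((-i).toNat : Nat) : Int) := by omega
  rw [hi, PySem.List.pyGetD_neg_natCast xs (-i).toNat d hk1 hk2]
  have : (-(((-i).toNat : Nat) : Int)) + xs.length = ((xs.length - (-i).toNat : Nat) : Int) := by omega
  rw [this, PySem.List.pyGetD_natCast]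
  exact (List.getD_eq_getElem xs d (by omega)).symm

-- xs[i] for an in-range i reads the normalised position
theorem pyGetD_norm {α : Type} (xs : List α) (i : Int) (d : α)
    (h : PySem.Raise.InRange xs.length i) :
    PySem.List.pyGetD xs i d = xs.getD (normc xs.length i) d := by
  obtain ⟨h1, h2⟩ := h
  by_cases hc : i < 0
  · rw [pyGetD_wrap xs i d h1 hc,
      show i + (xs.length : Int) = ((normc xs.length i : Nat) : Int) by
        unfold normc; rw [if_pos hc]; omega,
      PySem.List.pyGetD_natCast]
  · have hnc : normc xs.length i = i.toNat := by unfold normc; rw [if_neg hc]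
    rw [hnc, PySem.List.pyGetD_eq_getElem xs d (by omega) h2]
    exact (List.getD_eq_getElem xs d (by omega)).symm

theorem normc_lt {n : Nat} {i : Int} (h : PySem.Raise.InRange n i) : normc n i < n := by
  obtain ⟨h1, h2⟩ := h
  unfold normc
  split <;> omega

theorem mem_gset_succ {arr : List (List Int)} {k j : Nat} :
    j ∈ gset arr (k + 1) ↔ j < arr.length ∧
      ∀ c ∈ arr.getD j [], PySem.Raise.InRange arr.length c ∧ normc arr.length c ∈ gset arr k := by
  simp [gset, List.mem_filter, List.all_eq_true, List.mem_range]

theorem gset_subset_succ {arr : List (List Int)} : ∀ k, gset arr k ⊆ gset arr (k + 1) := by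
  intro k
  induction k with
  | zero => intro x hx; simp [gset] at hx
  | succ k ih =>
    intro x hx
    rw [mem_gset_succ] at hx ⊢
    exact ⟨hx.1, fun c hc => ⟨(hx.2 c hc).1, ih (hx.2 c hc).2⟩⟩

theorem gset_mono {arr : List (List Int)} {k k' : Nat} (h : k ≤ k') :
    gset arr k ⊆ gset arr k' := by
  induction k', h using Nat.le_induction with
  | base => exact fun x hx => hx
  | succ m _ ih => exact fun x hx => gset_subset_succ m (ih hx)

-- A's -inf accumulator, named (defeq to the inline match in solveA)
def optStep (o : Option Int) (z : Int) : Option Int :=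
  match o with | none => some z | some m => some (max m z)

theorem foldl_optStep_map {α : Type} (l : List α) (f : α → Int) (init : Option Int) :
    l.foldl (fun o x => optStep o (f x)) init = (l.map f).foldl optStep init := by
  rw [List.foldl_map]

theorem optfold (zs : List Int) (a : Int) :
    zs.foldl optStep (some a) = some (zs.foldl max a) := by
  induction zs generalizing a with
  | nil => rfl
  | cons z t ih => simpa [optStep] using ih (max a z)

theorem enum_map (ys : List Int) : ∀ (s : Int),
    (PySem.List.enumerate ys s).map (fun p => p.2 + p.1 + 1)
      = (List.range ys.length).map (fun k => ys.getD k 0 + (s + k + 1)) := by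
  induction ys with
  | nil => intro s; rfl
  | cons y t ih =>
    intro s
    rw [PySem.List.enumerate_cons, List.length_cons, List.range_succ_eq_map]
    simp only [List.map_cons, List.map_map, ih (s + 1)]
    congr 1
    · simp only [List.getD_cons_zero, Nat.cast_zero]; ring
    · apply List.map_congr_left
      intro k _
      simp only [Function.comp]
      have hc : ((k + 1 : Nat) : Int) = (k : Int) + 1 := by push_cast; ring
      rw [List.getD_cons_succ, hc]
      ring_nf

-- A's -inf max loop equals B's enumerate max, as an Option
theorem maxloop_eq (ys : List Int) :
    (PySem.List.pyRange 0 (ys.length : Int) 1).foldl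
        (fun (mx : Option Int) i =>
          match mx with
          | none => some (PySem.List.pyGetD ys i 0 + (i + 1))
          | some m => some (max m (PySem.List.pyGetD ys i 0 + (i + 1)))) none
      = match (PySem.List.enumerate ys).map (fun p => p.2 + p.1 + 1) with
        | [] => none
        | x :: xs => some (xs.foldl max x) := by
  rw [PySem.List.pyRange_one, List.foldl_map]
  have hr : (((ys.length : Int)) - 0).toNat = ys.length := by omega
  rw [hr]
  have hbody : ∀ (o : Option Int), ∀ k ∈ List.range ys.length,
      (fun (mx : Option Int) i =>
        match mx with
        | none => some (PySem.List.pyGetD ys i 0 + (i + 1))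
        | some m => some (max m (PySem.List.pyGetD ys i 0 + (i + 1)))) o (0 + (k : Int))
      = (fun (o : Option Int) k => optStep o (ys.getD k 0 + ((0 : Int) + k + 1))) o k := by
    intro o k _
    simp [optStep, PySem.List.pyGetD_natCast]
  rw [PySem.List.foldl_congr_mem (List.range ys.length) _ _ none
        (fun o x hx => hbody o x hx),
      foldl_optStep_map, ← enum_map ys 0]
  cases hz : (PySem.List.enumerate ys).map (fun p => p.2 + p.1 + 1) with
  | nil => simp
  | cons x xs => simp [optStep, optfold]

-- fuel irrelevance of A's recursion on the well-founded core
theorem fuel_eq {arr : List (List Int)} :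
    ∀ (k : Nat) (j : Int), PySem.Raise.InRange arr.length j →
      normc arr.length j ∈ gset arr k →
      ∀ f₁ f₂, k ≤ f₁ → k ≤ f₂ → solveA arr f₁ j = solveA arr f₂ j := by
  intro k
  induction k with
  | zero => intro j _ hj; simp [gset] at hj
  | succ k ih =>
    intro j hjR hj f₁ f₂ hf₁ hf₂
    obtain ⟨g₁, rfl⟩ : ∃ g, f₁ = g + 1 := ⟨f₁ - 1, by omega⟩
    obtain ⟨g₂, rfl⟩ : ∃ g, f₂ = g + 1 := ⟨f₂ - 1, by omega⟩
    rw [mem_gset_succ] at hj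
    simp only [solveA, pyGetD_norm arr j ([] : List Int) hjR,
      PySem.List.foldl_append_singleton_eq_map, List.nil_append]
    have hmap : (arr.getD (normc arr.length j) []).map (solveA arr g₁)
        = (arr.getD (normc arr.length j) []).map (solveA arr g₂) := by
      apply List.map_congr_left
      intro c hc
      have hcb := hj.2 c hc
      exact ih c hcb.1 hcb.2 g₁ g₂ (by omega) (by omega)
    rw [hmap]

-- a nodup list contained in another list is no longer than it
theorem nodup_subset_length {α : Type} [DecidableEq α] (l m : List α)
    (h1 : l.Nodup) (h2 : ∀ x ∈ l, x ∈ m) : l.length ≤ m.length := by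
  calc l.length = l.toFinset.card := (List.toFinset_card_of_nodup h1).symm
    _ ≤ m.toFinset.card :=
        Finset.card_le_card (fun x hx => List.mem_toFinset.mpr (h2 x (List.mem_toFinset.mp hx)))
    _ ≤ m.length := m.toFinset_card_le

theorem foldl_len (arr : List (List Int)) : ∀ a : Nat,
    arr.foldl (fun a row => a + row.length) a = a + arr.flatten.length := by
  induction arr with
  | nil => intro a; simp
  | cons row t ih =>
    intro a
    simp only [List.foldl_cons, List.flatten_cons, List.length_append, ih]
    omega

-- the in-range / core invariant propagates from a node to its child references,
-- which are moreover entries of arr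
theorem child_inv {arr : List (List Int)} {j : Int}
    (hjR : PySem.Raise.InRange arr.length j)
    (hjG : normc arr.length j ∈ gset arr arr.length) :
    ∀ c ∈ PySem.List.pyGetD arr j [], c ∈ arr.flatten ∧
      PySem.Raise.InRange arr.length c ∧ normc arr.length c ∈ gset arr arr.length := by
  obtain ⟨m, hm⟩ : ∃ m, arr.length = m + 1 := by
    have := hjR; unfold PySem.Raise.InRange at this
    exact ⟨arr.length - 1, by omega⟩
  intro c hc
  rw [pyGetD_norm arr j ([] : List Int) hjR] at hc
  have hjG' : normc arr.length j ∈ gset arr (m + 1) := by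
    rw [show gset arr (m + 1) = gset arr arr.length from by rw [hm]]
    exact hjG
  rw [mem_gset_succ] at hjG'
  have hfacts := hjG'.2 c hc
  have hrow : arr.getD (normc arr.length j) [] ∈ arr := by
    rw [List.getD_eq_getElem arr [] (normc_lt hjR)]
    exact List.getElem_mem _
  refine ⟨List.mem_flatten.mpr ⟨_, hrow, hc⟩, hfacts.1, ?_⟩
  rw [show gset arr arr.length = gset arr (m + 1) from by rw [hm]]
  exact gset_subset_succ m hfacts.2

-- the closure loop, run with enough fuel, reaches the fixpoint: the result is closed under
-- the child relation, contains the start set, and keeps the in-range/core invariant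
theorem reachClose_ok (arr : List (List Int)) (index : Int) :
    ∀ (fuel : Nat) (s : PySem.Set Int),
      s.Nodup →
      (∀ j ∈ s, j = index ∨ j ∈ arr.flatten) →
      (∀ j ∈ s, PySem.Raise.InRange arr.length j ∧ normc arr.length j ∈ gset arr arr.length) →
      arr.flatten.length + 2 ≤ fuel + s.length →
      ((∀ j ∈ reachClose arr fuel s,
          PySem.Raise.InRange arr.length j ∧ normc arr.length j ∈ gset arr arr.length) ∧
       (∀ j ∈ s, j ∈ reachClose arr fuel s) ∧
       (∀ j ∈ reachClose arr fuel s, ∀ c ∈ PySem.List.pyGetD arr j [], c ∈ reachClose arr fuel s)) := by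
  intro fuel
  induction fuel with
  | zero =>
    intro s hnd hsub _ hfuel
    exfalso
    have hsub' : ∀ x ∈ s, x ∈ (index :: arr.flatten) := by
      intro x hx
      rcases hsub x hx with h | h
      · rw [h]; exact List.mem_cons_self
      · exact List.mem_cons_of_mem _ h
    have hle : s.length ≤ (index :: arr.flatten).length :=
      nodup_subset_length s (index :: arr.flatten) hnd hsub'
    simp only [List.length_cons] at hle
    omega
  | succ f ih =>
    intro s hnd hsub hinv hfuel
    have hmemb : ∀ x, x ∈ reachStep arr s ↔ x ∈ s ∨ ∃ j ∈ s, x ∈ PySem.List.pyGetD arr j [] := by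
      intro x
      unfold reachStep
      rw [PySem.Set.mem_update, List.mem_flatMap]
    have hredif : reachClose arr (f + 1) s
        = if PySem.Set.equal (reachStep arr s) s then s
          else reachClose arr f (reachStep arr s) := rfl
    by_cases heq : PySem.Set.equal (reachStep arr s) s = true
    · have hred : reachClose arr (f + 1) s = s := by
        rw [hredif, if_pos heq]
      rw [hred]
      have hiff := (PySem.Set.equal_iff _ _).mp heq
      refine ⟨hinv, fun j hj => hj, ?_⟩
      intro j hj c hc
      exact (hiff c).mp ((hmemb c).mpr (Or.inr ⟨j, hj, hc⟩))
    · have hred : reachClose arr (f + 1) s = reachClose arr f (reachStep arr s) := by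
        rw [hredif, if_neg heq]
      -- the next set keeps the invariants …
      have hnd' : (reachStep arr s).Nodup := PySem.Set.nodup_update _ _ hnd
      have hsub' : ∀ j ∈ reachStep arr s, j = index ∨ j ∈ arr.flatten := by
        intro j hj
        rcases (hmemb j).mp hj with h | ⟨p, hp, hc⟩
        · exact hsub j h
        · exact Or.inr (child_inv (hinv p hp).1 (hinv p hp).2 j hc).1
      have hinv' : ∀ j ∈ reachStep arr s,
          PySem.Raise.InRange arr.length j ∧ normc arr.length j ∈ gset arr arr.length := by
        intro j hj
        rcases (hmemb j).mp hj with h | ⟨p, hp, hc⟩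
        · exact hinv j h
        · exact (child_inv (hinv p hp).1 (hinv p hp).2 j hc).2
      -- … and is strictly larger, so the remaining fuel still suffices
      have hgrow : s.length + 1 ≤ (reachStep arr s).length := by
        have hx : ∃ x, x ∈ reachStep arr s ∧ x ∉ s := by
          by_contra hno
          push Not at hno
          apply heq
          rw [PySem.Set.equal_iff]
          intro x
          constructor
          · exact hno x
          · intro hx; exact (hmemb x).mpr (Or.inl hx)
        obtain ⟨x, hxb, hxs⟩ := hx
        have hb : reachStep arr s
            = s ++ (PySem.Set.ofList (s.flatMap (fun j => PySem.List.pyGetD arr j []))).filter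
                (fun y => !(PySem.Set.contains s y)) := by
          unfold reachStep
          exact PySem.Set.update_eq_append_filter _ _
        have hxt : x ∈ (PySem.Set.ofList (s.flatMap (fun j => PySem.List.pyGetD arr j []))).filter
            (fun y => !(PySem.Set.contains s y)) := by
          rcases List.mem_append.mp (by rw [← hb]; exact hxb) with h | h
          · exact absurd h hxs
          · exact h
        have := List.length_pos_of_mem hxt
        rw [hb, List.length_append]
        omega
      rw [hred]
      obtain ⟨c1, c2, c3⟩ := ih (reachStep arr s) hnd' hsub' hinv' (by omega)
      exact ⟨c1, fun j hj => c2 j ((hmemb j).mpr (Or.inl hj)), c3⟩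

-- a common gset level for a monotone property of each member of a list
theorem exists_common {α : Type} (P : α → Nat → Prop)
    (hmono : ∀ c d d', d ≤ d' → P c d → P c d') :
    ∀ l : List α, (∀ c ∈ l, ∃ d, P c d) → ∃ D, ∀ c ∈ l, P c D := by
  intro l
  induction l with
  | nil => intro _; exact ⟨0, fun c hc => absurd hc (List.not_mem_nil)⟩
  | cons c t ih =>
    intro h
    obtain ⟨d₁, hd₁⟩ := h c (List.mem_cons_self)
    obtain ⟨D, hD⟩ := ih (fun x hx => h x (List.mem_cons_of_mem _ hx))
    refine ⟨max d₁ D, fun x hx => ?_⟩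
    rcases List.mem_cons.mp hx with rfl | hxt
    · exact hmono x d₁ _ (le_max_left _ _) hd₁
    · exact hmono x D _ (le_max_right _ _) (hD x hxt)

-- soundness of a value table: every stored key is in range, well-founded, and holds A's value
def dsound (arr : List (List Int)) (value : PySem.Dict Int Int) : Prop :=
  ∀ (k v : Int), value.get? k = some v →
    PySem.Raise.InRange arr.length k ∧
      ∃ d, normc arr.length k ∈ gset arr d ∧ v = solveA arr d k

-- the value B computes for a node whose children are all stored is A's value
theorem bbest_val {arr : List (List Int)} (value : PySem.Dict Int Int) (j : Int)
    (hjR : PySem.Raise.InRange arr.length j) (hs : dsound arr value)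
    (hall : ∀ c ∈ PySem.List.pyGetD arr j [], (value.get? c).isSome) :
    ∃ D, normc arr.length j ∈ gset arr (D + 1) ∧ bBest arr value j = solveA arr (D + 1) j := by
  have hmono : ∀ (c : Int) (d d' : Nat), d ≤ d' →
      (PySem.Raise.InRange arr.length c ∧ normc arr.length c ∈ gset arr d ∧
        (value.get? c).getD 0 = solveA arr d c) →
      (PySem.Raise.InRange arr.length c ∧ normc arr.length c ∈ gset arr d' ∧
        (value.get? c).getD 0 = solveA arr d' c) := by
    intro c d d' hdd ⟨hcR, hcG, hcv⟩
    exact ⟨hcR, gset_mono hdd hcG,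
      by rw [hcv]; exact fuel_eq d c hcR hcG d d' le_rfl hdd⟩
  have hex : ∀ c ∈ PySem.List.pyGetD arr j [], ∃ d,
      PySem.Raise.InRange arr.length c ∧ normc arr.length c ∈ gset arr d ∧
        (value.get? c).getD 0 = solveA arr d c := by
    intro c hc
    obtain ⟨v, hv⟩ := Option.isSome_iff_exists.mp (hall c hc)
    obtain ⟨hcR, d, hcG, hcv⟩ := hs c v hv
    exact ⟨d, hcR, hcG, by rw [hv, Option.getD_some, hcv]⟩
  obtain ⟨D, hD⟩ := exists_common _ hmono _ hex
  have hgset : normc arr.length j ∈ gset arr (D + 1) := by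
    rw [mem_gset_succ]
    refine ⟨normc_lt hjR, ?_⟩
    intro c hc
    have := hD c (by rw [pyGetD_norm arr j ([] : List Int) hjR]; exact hc)
    exact ⟨this.1, this.2.1⟩
  refine ⟨D, hgset, ?_⟩
  have hvals : (PySem.List.pyGetD arr j []).map (fun c => (value.get? c).getD 0)
      = (PySem.List.pyGetD arr j []).map (solveA arr D) := by
    apply List.map_congr_left
    intro c hc
    exact (hD c hc).2.2
  unfold bBest bRanked
  rw [hvals]
  simp only [solveA]
  by_cases hnil : PySem.List.pyGetD arr j [] = ([] : List Int)
  · rw [hnil]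
    simp [PySem.List.sorted]
  · have hlenne : (PySem.List.pyGetD arr j []).length ≠ 0 := by simpa using hnil
    simp only [hlenne, PySem.List.foldl_append_singleton_eq_map, List.nil_append]
    rw [maxloop_eq]
    have hrne : PySem.List.sorted ((PySem.List.pyGetD arr j []).map (solveA arr D)) (fun x => x) true ≠ [] := by
      rw [Ne, PySem.List.sorted_eq_nil_iff]
      simpa using hnil
    cases hz : (PySem.List.enumerate (PySem.List.sorted ((PySem.List.pyGetD arr j []).map (solveA arr D)) (fun x => x) true)).map (fun p => p.2 + p.1 + 1) with
    | nil =>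
      exfalso
      apply hrne
      have hlz := congrArg List.length hz
      simp only [List.length_map, PySem.List.length_enumerate, List.length_nil] at hlz
      exact List.eq_nil_of_length_eq_zero hlz
    | cons x xs => simp

theorem bstep_sound {arr : List (List Int)} (value : PySem.Dict Int Int) (j : Int)
    (hjR : PySem.Raise.InRange arr.length j)
    (hs : dsound arr value) : dsound arr (bStep arr value j) := by
  unfold bStep
  split
  case isTrue hguard =>
    intro k v hv
    by_cases hkj : k = j
    · subst hkj
      rw [PySem.Dict.get?_insert_self] at hv
      have hall : ∀ c ∈ PySem.List.pyGetD arr k [], (value.get? c).isSome := by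
        have := (Bool.and_eq_true _ _).mp hguard |>.2
        simpa [List.all_eq_true] using this
      obtain ⟨D, hD, hval⟩ := bbest_val value k hjR hs hall
      exact ⟨hjR, D + 1, hD, by rw [← Option.some.inj hv, hval]⟩
    · rw [PySem.Dict.get?_insert_of_ne _ _ hkj] at hv
      exact hs k v hv
  case isFalse => exact hs

theorem bstep_mono {arr : List (List Int)} (value : PySem.Dict Int Int) (j x : Int)
    (h : (value.get? x).isSome) : ((bStep arr value j).get? x).isSome := by
  unfold bStep
  split
  · by_cases hx : x = j
    · subst hx; rw [PySem.Dict.get?_insert_self]; rfl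
    · rw [PySem.Dict.get?_insert_of_ne _ _ hx]; exact h
  · exact h

theorem fold_mono {arr : List (List Int)} :
    ∀ (L : List Int) (value : PySem.Dict Int Int) (x : Int), (value.get? x).isSome →
      ((L.foldl (bStep arr) value).get? x).isSome := by
  intro L
  induction L with
  | nil => intro value x h; exact h
  | cons j t ih => intro value x h; exact ih _ x (bstep_mono value j x h)

theorem bstep_self {arr : List (List Int)} {L : List Int} (value : PySem.Dict Int Int)
    (r : Nat) (j : Int)
    (hjR : PySem.Raise.InRange arr.length j)
    (hjC : ∀ c ∈ PySem.List.pyGetD arr j [], c ∈ L)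
    (hgj : normc arr.length j ∈ gset arr (r + 1))
    (hpres : ∀ i ∈ L, normc arr.length i ∈ gset arr r → (value.get? i).isSome) :
    ((bStep arr value j).get? j).isSome := by
  rw [mem_gset_succ] at hgj
  by_cases hN : (value.get? j).isSome
  · exact bstep_mono value j j hN
  · have hall : (PySem.List.pyGetD arr j []).all
        (fun c => (value.get? c).isSome) = true := by
      rw [List.all_eq_true]
      intro c hc
      have hc' := hc
      rw [pyGetD_norm arr j ([] : List Int) hjR] at hc'
      obtain ⟨hcR, hcG⟩ := hgj.2 c hc'
      exact hpres c (hjC c hc) hcG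
    have hNone : (value.get? j).isNone = true := by
      simpa [Option.isNone_iff_eq_none, Option.eq_none_iff_forall_ne_some,
        Option.isSome_iff_exists] using hN
    unfold bStep
    rw [if_pos (by rw [hNone, hall]; rfl), PySem.Dict.get?_insert_self]
    rfl

theorem inner_fold {arr : List (List Int)} {L : List Int} (r : Nat)
    (hL : ∀ j ∈ L, PySem.Raise.InRange arr.length j)
    (hC : ∀ j ∈ L, ∀ c ∈ PySem.List.pyGetD arr j [], c ∈ L) :
    ∀ (M : List Int) (value : PySem.Dict Int Int), (∀ j ∈ M, j ∈ L) →
      dsound arr value →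
      (∀ i ∈ L, normc arr.length i ∈ gset arr r → (value.get? i).isSome) →
      dsound arr (M.foldl (bStep arr) value) ∧
      (∀ i ∈ L, normc arr.length i ∈ gset arr r → ((M.foldl (bStep arr) value).get? i).isSome) ∧
      (∀ j ∈ M, normc arr.length j ∈ gset arr (r + 1) →
        ((M.foldl (bStep arr) value).get? j).isSome) := by
  intro M
  induction M with
  | nil =>
    intro value _ hs hpres
    exact ⟨hs, hpres, fun j hj => absurd hj (List.not_mem_nil)⟩
  | cons j t ih =>
    intro value hM hs hpres
    have hjL : j ∈ L := hM j (List.mem_cons_self)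
    have hs' := bstep_sound value j (hL j hjL) hs
    have hpres' : ∀ i ∈ L, normc arr.length i ∈ gset arr r → ((bStep arr value j).get? i).isSome :=
      fun i hi hgi => bstep_mono value j i (hpres i hi hgi)
    obtain ⟨c1, c2, c3⟩ := ih (bStep arr value j) (fun x hx => hM x (List.mem_cons_of_mem _ hx)) hs' hpres'
    refine ⟨c1, c2, ?_⟩
    intro x hx hxg
    rcases List.mem_cons.mp hx with rfl | hxt
    · exact fold_mono t _ _ (bstep_self value r x (hL x hjL) (hC x hjL) hxg hpres)
    · exact c3 x hxt hxg

-- the table after m full sweeps over a closed in-range list L: sound, and every member of L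
-- whose node lies in gset m is stored
theorem rounds {arr : List (List Int)} {L : List Int}
    (hL : ∀ j ∈ L, PySem.Raise.InRange arr.length j)
    (hC : ∀ j ∈ L, ∀ c ∈ PySem.List.pyGetD arr j [], c ∈ L) :
    ∀ m : Nat,
      dsound arr ((List.range m).foldl (fun v _ => L.foldl (bStep arr) v) PySem.Dict.empty) ∧
      ∀ j ∈ L, normc arr.length j ∈ gset arr m →
        (((List.range m).foldl (fun v _ => L.foldl (bStep arr) v) PySem.Dict.empty).get? j).isSome := by
  intro m
  induction m with
  | zero =>
    constructor
    · intro k v hv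
      rw [List.range_zero, List.foldl_nil, PySem.Dict.get?_empty] at hv
      exact absurd hv (by simp)
    · intro j _ hj; simp [gset] at hj
  | succ m ih =>
    have hit : (List.range (m + 1)).foldl (fun v _ => L.foldl (bStep arr) v) PySem.Dict.empty
        = L.foldl (bStep arr)
            ((List.range m).foldl (fun v _ => L.foldl (bStep arr) v) PySem.Dict.empty) := by
      rw [List.range_succ, List.foldl_append, List.foldl_cons, List.foldl_nil]
    obtain ⟨c1, c2, c3⟩ := inner_fold m hL hC L _ (fun j hj => hj) ih.1 ih.2
    rw [hit]
    exact ⟨c1, fun j hj hg => c3 j hj hg⟩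

-- ===== VERDICT (by name: the statement is the Claim_ definition above) =====
theorem solve_spec : Claim_equal_solve := by
  intro arr index _ hPre
  obtain ⟨hR, hG⟩ := hPre
  unfold Spec_solve solve solve_alt
  have hof : PySem.Set.ofList [index] = [index] :=
    PySem.Set.ofList_eq_self_of_nodup [index] (List.nodup_singleton index)
  set R := reachClose arr (arr.foldl (fun a row => a + row.length) 0 + 1)
    (PySem.Set.ofList [index]) with hRdef
  have hfuel : arr.flatten.length + 2
      ≤ (arr.foldl (fun a row => a + row.length) 0 + 1) + (PySem.Set.ofList [index]).length := by
    rw [foldl_len arr 0, hof]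
    simp
  obtain ⟨hRinv, hRsub, hRclosed⟩ := reachClose_ok arr index _ (PySem.Set.ofList [index])
    (by rw [hof]; simp)
    (by rw [hof]; intro j hj; rw [List.mem_singleton] at hj; exact Or.inl hj)
    (by rw [hof]; intro j hj; rw [List.mem_singleton] at hj; subst hj; exact ⟨hR, hG⟩)
    hfuel
  have hIdxR : index ∈ R := hRsub index (by rw [hof]; exact List.mem_singleton.mpr rfl)
  have hL : ∀ j ∈ R, PySem.Raise.InRange arr.length j := fun j hj => (hRinv j hj).1
  obtain ⟨hsound, hpres⟩ := rounds hL hRclosed arr.length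
  have hsome := hpres index hIdxR hG
  obtain ⟨v, hv⟩ := Option.isSome_iff_exists.mp hsome
  show solveA arr arr.length index
      = (((List.range arr.length).foldl (fun value _ => R.foldl (bStep arr) value)
          PySem.Dict.empty).get? index).getD 0
  rw [hv, Option.getD_some]
  obtain ⟨hkR, d, hgd, hval⟩ := hsound index v hv
  rw [hval]
  have e1 := fuel_eq d index hkR hgd d (max d arr.length) le_rfl (le_max_left _ _)
  have e2 := fuel_eq arr.length index hR hG arr.length (max d arr.length) le_rfl (le_max_right _ _)
  exact e2.trans e1.symm
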